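-- pv_equiv track=rewrite | github.com/gfriss/master_thesis | prod_dest.py | name_for_plot
-- ===== SOURCE A (Python) =====
-- def name_for_plot(name):
--     new_name = ''
--     surface = False
--     mantle = False
--     for letter in name:
--         if letter == 'J':
--             surface = True
--         elif letter == 'K':
--             mantle = True
--         elif letter.isnumeric() == True:
--             new_name += '$_'+letter+'$'
--         elif letter == '+' or letter == '-':
--             if letter[-1] == '$':
--                 new_name = new_name[:-1] + '^' + letter + '$'
--             else:
--                 new_name += '$^'+letter+'$'
--         else:
--             new_name += letter
--     if surface == True:
--         new_name += '$_s$'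
--     elif mantle == True:
--         new_name += '$_m$'
--     return new_name
-- ===== SOURCE B (Python) =====
-- def name_for_plot(name):
--     body = name.replace('J', '').replace('K', '')
--     for d in '0123456789':
--         body = body.replace(d, '$_' + d + '$')
--     for sign in '+-':
--         body = body.replace(sign, '$^' + sign + '$')
--     if 'J' in name:
--         body += '$_s$'
--     elif 'K' in name:
--         body += '$_m$'
--     return body
-- ===== Notes on version B (the rewrite author's own statement) =====
-- stated objective: faster
-- what changed: Replaces A's single stateful character loop (flag variables, string += per char) with staged whole-string passes: strip 'J'/'K' via str.replace, wrap each digit and each sign via one str.replace pass per target character, and decide the suffix with 'J' in name / 'K' in name membership tests; the dead letter[-1]=='$' branch disappears.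
import Mathlib
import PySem

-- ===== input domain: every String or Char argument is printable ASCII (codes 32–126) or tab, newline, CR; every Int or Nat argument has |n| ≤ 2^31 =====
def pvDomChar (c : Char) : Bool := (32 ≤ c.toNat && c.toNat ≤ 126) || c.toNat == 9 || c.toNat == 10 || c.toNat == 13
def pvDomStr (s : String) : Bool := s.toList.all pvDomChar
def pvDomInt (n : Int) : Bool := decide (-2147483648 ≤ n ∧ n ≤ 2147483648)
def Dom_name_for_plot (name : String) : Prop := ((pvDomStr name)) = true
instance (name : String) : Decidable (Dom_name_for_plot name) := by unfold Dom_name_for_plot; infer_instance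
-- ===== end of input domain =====

-- B replaces A's single stateful character loop by staged str.replace passes (strip J/K,
-- wrap digits, wrap signs) plus membership tests for the suffix; return values proved equal on Dom.

-- ===== PORT A =====
-- loop state: (new_name, surface, mantle); strings handled as List Char
def nfpStepA (st : List Char × Bool × Bool) (letter : Char) : List Char × Bool × Bool :=
  let (new_name, surface, mantle) := st
  if letter = 'J' then (new_name, true, mantle)
  else if letter = 'K' then (new_name, surface, true)
  else if PySem.Chars.isdigit letter then  -- isnumeric = isdigit on the printable-ASCII domain
    (new_name ++ ['$', '_', letter, '$'], surface, mantle)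
  else if letter = '+' ∨ letter = '-' then
    -- letter[-1] == '$' : letter is a single char here, so this tests letter = '$'
    if letter = '$' then
      (new_name.dropLast ++ ['^', letter, '$'], surface, mantle)
    else
      (new_name ++ ['$', '^', letter, '$'], surface, mantle)
  else (new_name ++ [letter], surface, mantle)

def name_for_plot (name : String) : String :=
  let st := name.toList.foldl nfpStepA ([], false, false)
  let new_name := st.1
  let new_name := if st.2.1 = true then new_name ++ ['$', '_', 's', '$']
                  else if st.2.2 = true then new_name ++ ['$', '_', 'm', '$']
                  else new_name
  String.ofList new_name

-- ===== PORT B =====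
-- staged replace passes, exactly as Source B does them
def name_for_plot_alt (name : String) : String :=
  let body := PySem.Chars.replace (PySem.Chars.replace name.toList ['J'] []) ['K'] []
  let body := ['0','1','2','3','4','5','6','7','8','9'].foldl
      (fun b d => PySem.Chars.replace b [d] ['$','_',d,'$']) body
  let body := ['+','-'].foldl
      (fun b s => PySem.Chars.replace b [s] ['$','^',s,'$']) body
  let body := if PySem.Chars.isIn ['J'] name.toList then body ++ ['$','_','s','$']
              else if PySem.Chars.isIn ['K'] name.toList then body ++ ['$','_','m','$']
              else body
  String.ofList body

-- ===== PRECONDITION & SPEC =====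
def Spec_name_for_plot (name : String) (out : String) : Prop := out = name_for_plot_alt name
instance (name : String) (out : String) : Decidable (Spec_name_for_plot name out) := by unfold Spec_name_for_plot; infer_instance

-- ===== CLAIM (what is proved, stated in full; the proofs are below) =====
def Claim_equal_name_for_plot : Prop := ∀ (name : String), Dom_name_for_plot name → Spec_name_for_plot name (name_for_plot name)

-- ===== LEMMAS AND PROOFS =====

-- per-character fragment: the common characterisation of both programs' body
def nfpFrag (c : Char) : List Char :=
  if c = 'J' ∨ c = 'K' then []
  else if PySem.Chars.isdigit c then ['$', '_', c, '$']
  else if c = '+' ∨ c = '-' then ['$', '^', c, '$']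
  else [c]

-- A's loop unrolled: body fragments plus the two flags
theorem nfp_loop (l : List Char) : ∀ (acc : List Char) (s m : Bool),
    l.foldl nfpStepA (acc, s, m) =
      (acc ++ l.flatMap nfpFrag, s || l.contains 'J', m || l.contains 'K') := by
  induction l with
  | nil => intro acc s m; simp
  | cons c t ih =>
    intro acc s m
    simp only [List.foldl_cons, List.flatMap_cons, List.contains_cons]
    rw [nfpStepA, nfpFrag]
    by_cases hJ : c = 'J'
    · subst hJ; simp [ih]
    · by_cases hK : c = 'K'
      · subst hK; simp [hJ, ih]
      · have hJ' : ('J' == c) = false := beq_eq_false_iff_ne.mpr (Ne.symm hJ)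
        have hK' : ('K' == c) = false := beq_eq_false_iff_ne.mpr (Ne.symm hK)
        by_cases hd : PySem.Chars.isdigit c
        · simp [hJ, hK, hd, hJ', hK', ih, List.append_assoc]
        · by_cases hpm : c = '+' ∨ c = '-'
          · have h₁ : ¬ c = '$' := by rcases hpm with h | h <;> subst h <;> decide
            simp [hJ, hK, hd, hpm, h₁, hJ', hK', ih, List.append_assoc]
          · simp [hJ, hK, hd, hpm, hJ', hK', ih]

-- single-character replace is a flatMap
theorem nfp_replace_go_single (p : Char) (new : List Char) :
    ∀ (l : List Char) (fuel : Nat) (acc : List Char), l.length ≤ fuel →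
    PySem.Chars.replace.go [p] new fuel l acc
      = acc.reverse ++ l.flatMap (fun c => if c = p then new else [c]) := by
  intro l
  induction l with
  | nil => intro fuel acc _; cases fuel <;> simp [PySem.Chars.replace.go]
  | cons c t ih =>
    intro fuel acc hlen
    cases fuel with
    | zero => simp at hlen
    | succ f =>
      simp only [PySem.Chars.replace.go, List.isPrefixOf, List.flatMap_cons]
      by_cases hc : c = p
      · subst hc
        simp only [BEq.rfl, Bool.true_and, if_true, List.length_cons, List.length_nil,
          List.drop_succ_cons, List.drop_zero]
        rw [ih f _ (by simpa using hlen)]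
        simp
      · have : (p == c) = false := beq_eq_false_iff_ne.mpr (Ne.symm hc)
        simp only [this, Bool.false_and, if_neg hc]
        rw [ih f _ (by simpa using hlen)]
        simp

theorem nfp_replace_single (l : List Char) (p : Char) (new : List Char) :
    PySem.Chars.replace l [p] new = l.flatMap (fun c => if c = p then new else [c]) := by
  rw [PySem.Chars.replace]
  simp only [List.isEmpty_cons, if_false, Bool.false_eq_true]
  exact nfp_replace_go_single p new l l.length [] le_rfl

-- a digit char is one of the ten ASCII digits
theorem nfp_digit_mem (c : Char) (h : PySem.Chars.isdigit c = true) :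
    c ∈ ['0','1','2','3','4','5','6','7','8','9'] := by
  simp only [PySem.Chars.isdigit, Bool.and_eq_true, decide_eq_true_eq] at h
  obtain ⟨h1, h2⟩ := h
  have hlo : 48 ≤ c.toNat := h1
  have hhi : c.toNat ≤ 57 := h2
  have hc : c = Char.ofNat c.toNat := (Char.ofNat_toNat c).symm
  interval_cases h3 : c.toNat <;> rw [hc] <;> decide

-- B's replace chain computes the same body fragments
theorem nfp_chain_eq (l : List Char) :
    ['+','-'].foldl (fun b s => PySem.Chars.replace b [s] ['$','^',s,'$'])
      (['0','1','2','3','4','5','6','7','8','9'].foldl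
        (fun b d => PySem.Chars.replace b [d] ['$','_',d,'$'])
        (PySem.Chars.replace (PySem.Chars.replace l ['J'] []) ['K'] []))
    = l.flatMap nfpFrag := by
  simp only [List.foldl_cons, List.foldl_nil]
  simp only [nfp_replace_single]
  simp only [List.flatMap_assoc]
  congr 1
  funext c
  by_cases hmemd : c ∈ ['0','1','2','3','4','5','6','7','8','9']
  · fin_cases hmemd <;> decide
  · have hd : PySem.Chars.isdigit c = false := by
      cases h : PySem.Chars.isdigit c
      · rfl
      · exact absurd (nfp_digit_mem c h) hmemd
    simp only [List.mem_cons, List.not_mem_nil, or_false] at hmemd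
    push Not at hmemd
    obtain ⟨h0, h1, h2, h3, h4, h5, h6, h7, h8, h9⟩ := hmemd
    by_cases hJ : c = 'J'
    · subst hJ; decide
    · by_cases hK : c = 'K'
      · subst hK; decide
      · by_cases hp : c = '+'
        · subst hp; decide
        · by_cases hm : c = '-'
          · subst hm; decide
          · simp [nfpFrag, hJ, hK, hd, hp, hm, h0, h1, h2, h3, h4, h5, h6, h7, h8, h9]

-- substring test for a single character is list membership
theorem nfp_isIn_single (x : Char) (l : List Char) :
    PySem.Chars.isIn [x] l = l.contains x := by
  by_cases h : x ∈ l
  · rw [(PySem.Chars.isIn_iff_infix _ _).mpr ((List.singleton_infix_iff x l).mpr h)]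
    simp [h]
  · rw [(PySem.Chars.isIn_eq_false_iff _ _).mpr (fun hinf => h ((List.singleton_infix_iff x l).mp hinf))]
    simp [h]

-- ===== VERDICT (by name: the statement is the Claim_ definition above) =====
theorem name_for_plot_spec : Claim_equal_name_for_plot := by
  intro name _
  unfold Spec_name_for_plot name_for_plot name_for_plot_alt
  rw [nfp_loop]
  simp only [nfp_chain_eq, nfp_isIn_single]
  simp
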